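-- pv_equiv track=rewrite | github.com/murnanedaniel/athena | Event/EventOverlay/EventOverlayJobTransforms/python/OverlayReadMetaData.py | listOptionalContainers
-- ===== SOURCE A (Python) =====
-- def listOptionalContainers(inputlist):
--     """Generate a list of optional containers"""
--     supported = ['TrackRecordCollection', 'CaloCalibrationHitContainer', 'HijingEventParams',
--                  "xAOD::TruthParticleContainer", "xAOD::JetContainer"]
--
--     containers = {}
--     for entry in inputlist:
--         if entry[0] not in supported:
--             continue
--
--         if entry[0] not in containers:
--             containers[entry[0]] = set()
--
--         containers[entry[0]].add(entry[1])
--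
--     return containers
-- ===== SOURCE B (Python) =====
-- def listOptionalContainers(inputlist):
--     """Generate a list of optional containers"""
--     supported = {'TrackRecordCollection', 'CaloCalibrationHitContainer', 'HijingEventParams',
--                  "xAOD::TruthParticleContainer", "xAOD::JetContainer"}
--     filtered = [entry for entry in inputlist if entry[0] in supported]
--     keys = list(dict.fromkeys(entry[0] for entry in filtered))
--     return {k: {entry[1] for entry in filtered if entry[0] == k} for k in keys}
-- ===== Notes on version B (the rewrite author's own statement) =====
-- stated objective: alternative
-- what changed: Replaces A's single insertion pass with per-entry membership/presence checks by a three-phase pipeline: filter to supported entries, dedup the keys in first-appearance order, then build each key's value set by a per-key scan of the filtered list.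
import Mathlib
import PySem

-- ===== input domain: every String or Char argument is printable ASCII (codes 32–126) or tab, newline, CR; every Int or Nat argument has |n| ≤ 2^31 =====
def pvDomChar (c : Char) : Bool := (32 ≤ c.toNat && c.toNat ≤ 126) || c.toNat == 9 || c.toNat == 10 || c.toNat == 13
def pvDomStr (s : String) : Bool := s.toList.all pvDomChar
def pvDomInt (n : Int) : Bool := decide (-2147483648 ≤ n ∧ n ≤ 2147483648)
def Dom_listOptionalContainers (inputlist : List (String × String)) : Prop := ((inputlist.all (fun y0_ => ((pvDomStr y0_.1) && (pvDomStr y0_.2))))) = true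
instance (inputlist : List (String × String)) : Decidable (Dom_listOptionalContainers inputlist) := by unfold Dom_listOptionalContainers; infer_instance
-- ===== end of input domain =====

-- B replaces A's single insertion pass (dict of sets, per-entry membership and presence
-- checks) by a filter / key-dedup / per-key-grouping pipeline; same result, similar cost.


-- ===== PORT A =====
def pvSupported : List String :=
  ["TrackRecordCollection", "CaloCalibrationHitContainer", "HijingEventParams",
   "xAOD::TruthParticleContainer", "xAOD::JetContainer"]

-- one iteration of A's for-loop over `containers`
def pvStepA (d : PySem.Dict String (PySem.Set String)) (e : String × String) :
    PySem.Dict String (PySem.Set String) :=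
  if pvSupported.contains e.1 = false then d
  else
    let d' := if d.contains e.1 = false then d.insert e.1 PySem.Set.empty else d
    d'.insert e.1 (PySem.Set.add (d'.getD e.1 PySem.Set.empty) e.2)

def listOptionalContainers (inputlist : List (String × String)) : List (String × List String) :=
  (inputlist.foldl pvStepA PySem.Dict.empty).items

-- ===== PORT B =====
def listOptionalContainers_alt (inputlist : List (String × String)) : List (String × List String) :=
  let filtered := inputlist.filter (fun e => pvSupported.contains e.1)
  let keys := PySem.List.dedup (filtered.map (fun e => e.1))
  keys.map (fun k =>
    (k, PySem.Set.ofList ((filtered.filter (fun e => e.1 == k)).map (fun e => e.2))))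

-- ===== PRECONDITION & SPEC =====
def Spec_listOptionalContainers (inputlist : List (String × String)) (out : List (String × List String)) : Prop := out = listOptionalContainers_alt inputlist
instance (inputlist : List (String × String)) (out : List (String × List String)) : Decidable (Spec_listOptionalContainers inputlist out) := by unfold Spec_listOptionalContainers; infer_instance

-- ===== CLAIM (what is proved, stated in full; the proofs are below) =====
def Claim_equal_listOptionalContainers : Prop := ∀ (inputlist : List (String × String)), Dom_listOptionalContainers inputlist → Spec_listOptionalContainers inputlist (listOptionalContainers inputlist)

-- ===== LEMMAS AND PROOFS =====

-- the value B assigns to key k, as a function of the filtered list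
def pvGroup (filtered : List (String × String)) (k : String) : String × List String :=
  (k, PySem.Set.ofList ((filtered.filter (fun e => e.1 == k)).map (fun e => e.2)))

lemma pvOfList_append_singleton {α : Type} [BEq α] [LawfulBEq α] (xs : List α) (x : α) :
    PySem.Set.ofList (xs ++ [x]) = PySem.Set.add (PySem.Set.ofList xs) x := by
  simp [PySem.Set.ofList_eq_foldl, List.foldl_append]

-- main invariant: A's dict after the loop has exactly B's items
lemma pvMain (l : List (String × String)) :
    (l.foldl pvStepA PySem.Dict.empty).items =
      (PySem.List.dedup ((l.filter (fun e => pvSupported.contains e.1)).map (fun e => e.1))).map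
        (pvGroup (l.filter (fun e => pvSupported.contains e.1))) := by
  induction l using List.reverseRecOn with
  | nil => rfl
  | append_singleton l e ih =>
    rw [List.foldl_append, List.foldl_cons, List.foldl_nil, List.filter_append]
    by_cases hs : pvSupported.contains e.1 = true
    · -- supported entry
      simp only [List.filter_cons, hs, if_true, List.filter_nil]
      set d := l.foldl pvStepA PySem.Dict.empty with hd
      set F := l.filter (fun e => pvSupported.contains e.1) with hF
      have hkeys : d.keys = PySem.List.dedup (F.map (fun e => e.1)) := by
        rw [show d.keys = d.items.map (fun p => p.1) from rfl, ih, List.map_map]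
        exact List.map_id _
      have hnodup : d.keys.Nodup := by
        rw [hkeys]; exact PySem.List.nodup_dedup _
      have hmapfst : (F ++ [e]).map (fun e => e.1) = F.map (fun e => e.1) ++ [e.1] := by
        simp
      by_cases hc : e.1 ∈ F.map (fun e => e.1)
      · -- key already present
        have hcont : d.contains e.1 = true := by
          rw [PySem.Dict.contains_eq_decide_mem_keys, hkeys]
          simp [hc]
        have hmem : (e.1, PySem.Set.ofList ((F.filter (fun p => p.1 == e.1)).map (fun p => p.2)))
            ∈ d.items := by
          rw [ih]
          exact List.mem_map.mpr ⟨e.1, by simp [hc], rfl⟩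
        have hget := PySem.Dict.getD_of_mem_items d hmem hnodup PySem.Set.empty
        have hkeys' : PySem.List.dedup ((F ++ [e]).map (fun e => e.1)) =
            PySem.List.dedup (F.map (fun e => e.1)) := by
          rw [hmapfst]
          simp only [PySem.List.dedup_eq_ofList, pvOfList_append_singleton]
          exact PySem.Set.add_of_mem (by simp [PySem.Set.mem_ofList, hc])
        have hsup : e.1 ∈ pvSupported := by simpa using hs
        have hstep : pvStepA d e = d.insert e.1 (PySem.Set.add (d.getD e.1 PySem.Set.empty) e.2) := by
          simp [pvStepA, hsup, hcont]
        rw [hstep, PySem.Dict.items_insert_of_contains d _ hcont, ih, hget, hkeys', List.map_map]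
        apply List.map_congr_left
        intro k hk
        by_cases hke : k = e.1
        · subst hke
          simp only [Function.comp_apply, pvGroup, beq_self_eq_true,
            List.filter_append, List.filter_cons, List.filter_nil]
          simp [pvOfList_append_singleton]
        · simp only [Function.comp_apply, pvGroup]
          rw [if_neg (by simp [hke])]
          simp only [Prod.mk.injEq, true_and]
          congr 1
          rw [List.filter_append]
          simp [Ne.symm hke]
      · -- fresh key
        have hcont : d.contains e.1 = false := by
          rw [PySem.Dict.contains_eq_decide_mem_keys, hkeys]
          simp [hc]
        have hkeys' : PySem.List.dedup ((F ++ [e]).map (fun e => e.1)) =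
            PySem.List.dedup (F.map (fun e => e.1)) ++ [e.1] := by
          rw [hmapfst]
          simp only [PySem.List.dedup_eq_ofList, pvOfList_append_singleton]
          exact PySem.Set.add_of_not_mem (by simp [PySem.Set.mem_ofList, hc])
        have hFe : F.filter (fun p => p.1 == e.1) = [] := by
          rw [List.filter_eq_nil_iff]
          intro p hp
          simp only [beq_iff_eq]
          intro h; exact hc (List.mem_map.mpr ⟨p, hp, h⟩)
        have hsup : e.1 ∈ pvSupported := by simpa using hs
        have hstep : pvStepA d e = (d.insert e.1 PySem.Set.empty).insert e.1
            (PySem.Set.add ((d.insert e.1 PySem.Set.empty).getD e.1 PySem.Set.empty) e.2) := by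
          simp [pvStepA, hsup, hcont]
        rw [hstep, PySem.Dict.items_insert_of_contains _ _ (PySem.Dict.contains_insert_self d e.1 _),
          PySem.Dict.items_insert_of_not_contains d _ hcont,
          PySem.Dict.getD_insert_self, ih, hkeys', List.map_append, List.map_map,
          List.map_append]
        congr 1
        · apply List.map_congr_left
          intro k hk
          have hke : k ≠ e.1 := by
            intro h; subst h
            exact hc ((PySem.List.mem_dedup _ _).mp (by simpa using hk))
          simp only [Function.comp_apply, pvGroup]
          rw [if_neg (by simp [hke])]
          simp only [Prod.mk.injEq, true_and]
          congr 1
          rw [List.filter_append]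
          simp [Ne.symm hke]
        · simp only [List.map_cons, List.map_nil, pvGroup, List.filter_append, hFe,
            List.filter_cons, beq_self_eq_true, List.nil_append]
          simp [PySem.Set.add, PySem.Set.empty]
          rfl
    · -- unsupported entry: step is identity, filter drops e
      simp only [Bool.not_eq_true] at hs
      simp only [List.filter_cons, hs, List.filter_nil, List.append_nil, pvStepA,
        if_false, Bool.false_eq_true]
      exact ih

-- ===== VERDICT (by name: the statement is the Claim_ definition above) =====
theorem listOptionalContainers_spec : Claim_equal_listOptionalContainers := by
  intro l _
  exact pvMain l
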